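-- pv_equiv track=rewrite | github.com/soyukke/lean-unsolved | scripts/confluence_constant_final.py | confluence_time_min
-- ===== SOURCE A (Python) =====
-- def syracuse(n):
--     val = 3 * n + 1
--     while val % 2 == 0:
--         val //= 2
--     return val
--
-- def orbit(n, max_steps=1000):
--     if n % 2 == 0:
--         while n % 2 == 0:
--             n //= 2
--     traj = [n]
--     current = n
--     for _ in range(max_steps):
--         if current == 1:
--             break
--         current = syracuse(current)
--         traj.append(current)
--     return traj
--
-- def orbit_dict(n, max_steps=500):
--     orb = {}
--     current = n if n % 2 == 1 else n // (n & -n)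
--     for i in range(max_steps):
--         if current not in orb:
--             orb[current] = i
--         if current == 1:
--             break
--         current = syracuse(current)
--     return orb
--
-- def confluence_time_min(n1, n2, max_steps=500):
--     """最小合流時間 (s1+s2 を最小化)"""
--     orb1 = orbit_dict(n1, max_steps)
--     orb2 = orbit(n2, max_steps)
--     best = float('inf')
--     best_mp = None
--     for j, v in enumerate(orb2):
--         if v in orb1:
--             total = orb1[v] + j
--             if total < best:
--                 best = total
--                 best_mp = v
--     return (best, best_mp) if best < float('inf') else (None, None)
-- ===== SOURCE B (Python) =====
-- def _traj(n, count):
--     # distinct prefix of the normalized odd-Syracuse trajectory of n: odd part of n, then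
--     # odd Syracuse steps; stops at 1, at the first repeated value (cycle), or after
--     # `count` recorded values.  Only first occurrences can matter for the minimum.
--     while n % 2 == 0:
--         n //= 2
--     out = []
--     seen = set()
--     cur = n
--     for _ in range(count):
--         if cur in seen:
--             break
--         out.append(cur)
--         seen.add(cur)
--         if cur == 1:
--             break
--         v = 3 * cur + 1
--         while v % 2 == 0:
--             v //= 2
--         cur = v
--     return out
--
-- def confluence_time_min(n1, n2, max_steps=500):
--     """最小合流時間 (s1+s2 を最小化)"""
--     t1 = _traj(n1, max_steps)
--     t2 = _traj(n2, max_steps + 1)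
--     # diagonal (wavefront) search over candidate totals t; the first hit is the minimum,
--     # and scanning j ascending on each diagonal reproduces the first-on-ties rule
--     for t in range(len(t1) + len(t2) - 1):
--         for j in range(max(0, t - len(t1) + 1), min(t, len(t2) - 1) + 1):
--             if t1[t - j] == t2[j]:
--                 return (t, t2[j])
--     return (None, None)
-- ===== Notes on version B (the rewrite author's own statement) =====
-- stated objective: alternative
-- what changed: A builds a value-to-first-step-index dict of one full orbit and scans the other full orbit (duplicates included) with a running best/best_mp accumulator; B materialises both normalized trajectories only up to their first repeated value (cycle detection makes every recorded entry a first occurrence) and runs a diagonal wavefront search over candidate totals t = 0, 1, 2, ..., returning at the very first hit, which is the minimum by construction, with ascending j on each diagonal reproducing the first-on-ties rule.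
import Mathlib
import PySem

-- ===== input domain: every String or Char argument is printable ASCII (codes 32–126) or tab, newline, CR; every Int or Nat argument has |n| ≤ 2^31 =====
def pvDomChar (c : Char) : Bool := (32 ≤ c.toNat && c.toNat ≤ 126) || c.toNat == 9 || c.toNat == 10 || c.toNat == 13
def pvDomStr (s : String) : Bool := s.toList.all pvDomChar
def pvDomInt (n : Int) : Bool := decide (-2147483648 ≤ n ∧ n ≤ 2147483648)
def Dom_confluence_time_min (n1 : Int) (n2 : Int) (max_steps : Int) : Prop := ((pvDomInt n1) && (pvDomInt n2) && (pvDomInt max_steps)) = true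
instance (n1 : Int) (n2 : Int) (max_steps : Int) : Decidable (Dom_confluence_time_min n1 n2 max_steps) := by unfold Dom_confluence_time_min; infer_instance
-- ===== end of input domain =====

-- B replaces A's dict-membership scan with a different algorithm: a diagonal (wavefront) search over
-- candidate totals t = 0, 1, 2, … that returns at the first hit ("alternative", no speed claim).

-- ===== PORT A =====

-- termination measure fact for the 'while x % 2 == 0: x //= 2' loops (cited by decreasing_by)
theorem pvHalveDec (v : Int) (h : v ≠ 0 ∧ PySem.Int.mod v 2 = 0) :
    (PySem.Int.floordiv v 2).natAbs < v.natAbs := by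
  have h2 : (2:Int) ∣ v := (PySem.Int.mod_eq_zero_iff_dvd v 2).1 h.2
  obtain ⟨k, rfl⟩ := h2
  rw [PySem.Int.floordiv_eq_ediv_of_pos (by norm_num), Int.mul_ediv_cancel_left _ (by norm_num)]
  have hk : k ≠ 0 := by rintro rfl; exact h.1 (by ring)
  have : (2 * k).natAbs = 2 * k.natAbs := by simp [Int.natAbs_mul]
  omega

-- the loop 'while x % 2 == 0: x //= 2' that appears in syracuse and in orbit;
-- the 'v ≠ 0' conjunct is a totality guard only (Python diverges at 0; Pre_ keeps 0 out)
def halveA (v : Int) : Int :=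
  if h : v ≠ 0 ∧ PySem.Int.mod v 2 = 0 then halveA (PySem.Int.floordiv v 2) else v
termination_by v.natAbs
decreasing_by exact pvHalveDec v h

def syracuseA (n : Int) : Int := halveA (3 * n + 1)

def orbitGoA (current : Int) (fuel : Nat) (traj : List Int) : List Int :=
  match fuel with
  | 0 => traj
  | f + 1 =>
    if current = 1 then traj
    else orbitGoA (syracuseA current) f (traj ++ [syracuseA current])

def orbitA (n : Int) (max_steps : Int) : List Int :=
  let n' := if PySem.Int.mod n 2 = 0 then halveA n else n
  orbitGoA n' max_steps.toNat [n']

def odGoA (cur : Int) (fuel : Nat) (i : Int) (d : PySem.Dict Int Int) : PySem.Dict Int Int :=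
  match fuel with
  | 0 => d
  | f + 1 =>
    let d' := if d.contains cur = false then d.insert cur i else d
    if cur = 1 then d' else odGoA (syracuseA cur) f (i + 1) d'

def orbitDictA (n : Int) (max_steps : Int) : PySem.Dict Int Int :=
  odGoA (if PySem.Int.mod n 2 = 1 then n
         else PySem.Int.floordiv n (PySem.Int.band n (-n)))
        max_steps.toNat 0 PySem.Dict.empty

-- one iteration of A's 'for j, v in enumerate(orb2)' loop; acc = (best, best_mp), best none = float('inf')
def cfmStep (orb1 : PySem.Dict Int Int) (acc : Option Int × Option Int) (p : Int × Int) :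
    Option Int × Option Int :=
  match orb1.get? p.2 with
  | none => acc
  | some s =>
    let total := s + p.1
    match acc.1 with
    | none => (some total, some p.2)
    | some b => if total < b then (some total, some p.2) else acc

def confluence_time_min (n1 : Int) (n2 : Int) (max_steps : Int) : Option Int × Option Int :=
  let orb1 := orbitDictA n1 max_steps
  let orb2 := orbitA n2 max_steps
  let r := (PySem.List.enumerate orb2).foldl (cfmStep orb1) (none, none)
  match r.1 with
  | some b => (some b, r.2)
  | none => (none, none)

-- ===== PORT B =====

-- B's 'while m % 2 == 0: m //= 2' halving loops are the same loop as A's: halveA is reused.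
-- _traj's 'for _ in range(count)' recording loop with its seen-set cycle detection
def dtrajGo (cur : Int) (fuel : Nat) (seen : PySem.Set Int) (out : List Int) : List Int :=
  match fuel with
  | 0 => out
  | f + 1 =>
    if PySem.Set.contains seen cur then out
    else
      let out' := out ++ [cur]
      let seen' := PySem.Set.add seen cur
      if cur = 1 then out' else dtrajGo (halveA (3 * cur + 1)) f seen' out'

def trajB (n : Int) (count : Int) : List Int :=
  dtrajGo (halveA n) count.toNat PySem.Set.empty []

-- inner 'for j in range(lo, hi)' with early return; the indices t-j and j are always
-- in range by the loop bounds (Python would raise IndexError otherwise)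
def diagInner (t1 t2 : List Int) (t : Int) : List Int → Option (Int × Int)
  | [] => none
  | j :: js =>
    if PySem.List.pyGetD t1 (t - j) 0 == PySem.List.pyGetD t2 j 0 then
      some (t, PySem.List.pyGetD t2 j 0)
    else diagInner t1 t2 t js

-- outer 'for t in range(len(t1) + len(t2) - 1)' with early return
def diagOuter (t1 t2 : List Int) : List Int → Option (Int × Int)
  | [] => none
  | t :: ts =>
    match diagInner t1 t2 t
        (PySem.List.pyRange (max 0 (t - PySem.List.len t1 + 1))
          (min t (PySem.List.len t2 - 1) + 1) 1) with
    | some r => some r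
    | none => diagOuter t1 t2 ts

def confluence_time_min_alt (n1 : Int) (n2 : Int) (max_steps : Int) : Option Int × Option Int :=
  let t1 := trajB n1 max_steps
  let t2 := trajB n2 (max_steps + 1)
  match diagOuter t1 t2
      (PySem.List.pyRange 0 (PySem.List.len t1 + PySem.List.len t2 - 1) 1) with
  | some (t, v) => (some t, some v)
  | none => (none, none)

-- ===== PRECONDITION & SPEC =====

-- Pre_ excludes n1 = 0 (orbit_dict raises ZeroDivisionError on 0 // (0 & -0)) and n2 = 0
-- (orbit's 'while n % 2 == 0: n //= 2' loops forever); A never returns a value there.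
def Pre_confluence_time_min (n1 : Int) (n2 : Int) (max_steps : Int) : Prop :=
  n1 ≠ 0 ∧ n2 ≠ 0

instance (n1 : Int) (n2 : Int) (max_steps : Int) : Decidable (Pre_confluence_time_min n1 n2 max_steps) := by
  unfold Pre_confluence_time_min; infer_instance

def pvWitness_confluence_time_min : Int × Int × Int := (7, 3, 20)

def Spec_confluence_time_min (n1 : Int) (n2 : Int) (max_steps : Int) (out : Option Int × Option Int) : Prop := out = confluence_time_min_alt n1 n2 max_steps
instance (n1 : Int) (n2 : Int) (max_steps : Int) (out : Option Int × Option Int) : Decidable (Spec_confluence_time_min n1 n2 max_steps out) := by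
  unfold Spec_confluence_time_min; infer_instance

-- ===== CLAIM (what is proved, stated in full; the proofs are below) =====
def Claim_equal_confluence_time_min : Prop := ∀ (n1 : Int) (n2 : Int) (max_steps : Int), Dom_confluence_time_min n1 n2 max_steps → Pre_confluence_time_min n1 n2 max_steps → Spec_confluence_time_min n1 n2 max_steps (confluence_time_min n1 n2 max_steps)

-- ===== LEMMAS AND PROOFS =====

-- the trajectory both programs walk, as one list (at most `fuel` entries, stopping once 1 is recorded)
def trajFull (c : Int) : Nat → List Int
  | 0 => []
  | f + 1 => c :: (if c = 1 then [] else trajFull (syracuseA c) f)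

def trajRest (c : Int) : Nat → List Int
  | 0 => []
  | f + 1 => if c = 1 then [] else syracuseA c :: trajRest (syracuseA c) f

theorem orbitGoA_eq (f : Nat) : ∀ (c : Int) (acc : List Int),
    orbitGoA c f acc = acc ++ trajRest c f := by
  induction f with
  | zero => intro c acc; simp [orbitGoA, trajRest]
  | succ f ih =>
    intro c acc
    simp only [orbitGoA, trajRest]
    split
    · simp
    · rw [ih]; simp

theorem trajFull_succ (f : Nat) : ∀ c : Int, trajFull c (f + 1) = c :: trajRest c f := by
  induction f with
  | zero => intro c; by_cases h : c = 1 <;> simp [trajFull, trajRest, h]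
  | succ f ih =>
    intro c
    have h2 := ih (syracuseA c)
    rw [show trajFull (syracuseA c) (f + 1)
          = syracuseA c :: (if syracuseA c = 1 then [] else trajFull (syracuseA (syracuseA c)) f)
        from rfl] at h2
    injection h2 with _ h3
    by_cases h : c = 1 <;> simp [trajFull, trajRest, h, h3]

theorem halveA_odd (n : Int) (h : PySem.Int.mod n 2 ≠ 0) : halveA n = n := by
  have hnd : ¬ (2:Int) ∣ n := fun hd => h ((PySem.Int.mod_eq_zero_iff_dvd n 2).2 hd)
  rw [halveA]
  simp [hnd]

theorem norm_orbit_eq (n : Int) :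
    (if PySem.Int.mod n 2 = 0 then halveA n else n) = halveA n := by
  split_ifs with h
  · rfl
  · rw [halveA_odd n h]

-- ---- the n & -n bit identity ----

def gNat (m : Nat) : Nat := m - (m &&& (m - 1))

theorem nat_and_pred_odd (m : Nat) (h : m % 2 = 1) : m &&& (m - 1) = m - 1 := by
  apply Nat.eq_of_testBit_eq
  intro i
  cases i with
  | zero =>
    simp only [Nat.testBit_and, Nat.testBit_zero]
    have : (m - 1) % 2 = 0 := by omega
    simp [this]
  | succ i =>
    rw [Nat.testBit_and]
    simp only [Nat.testBit_succ]
    have : m / 2 = (m - 1) / 2 := by omega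
    rw [this, Bool.and_self]

theorem nat_and_pred_even (k : Nat) (hk : 0 < k) :
    (2 * k) &&& (2 * k - 1) = 2 * (k &&& (k - 1)) := by
  apply Nat.eq_of_testBit_eq
  intro i
  cases i with
  | zero =>
    simp only [Nat.testBit_and, Nat.testBit_zero]
    have h1 : (2 * k) % 2 = 0 := by omega
    have h2 : (2 * (k &&& (k - 1))) % 2 = 0 := by omega
    simp [h1, h2]
  | succ i =>
    rw [Nat.testBit_and]
    simp only [Nat.testBit_succ]
    have h1 : 2 * k / 2 = k := by omega
    have h2 : (2 * k - 1) / 2 = k - 1 := by omega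
    have h3 : 2 * (k &&& (k - 1)) / 2 = k &&& (k - 1) := by omega
    rw [h1, h2, h3, ← Nat.testBit_and]

theorem gNat_pos (m : Nat) (h : 0 < m) : 0 < gNat m := by
  have := Nat.and_le_right (n := m) (m := m - 1)
  unfold gNat; omega

theorem band_self_neg (n : Int) (h : n ≠ 0) :
    PySem.Int.band n (-n) = ((gNat n.natAbs : Nat) : Int) := by
  rcases lt_or_gt_of_ne h with hneg | hpos
  · rw [PySem.Int.band, if_neg (by omega), if_pos (by omega)]
    have e1 : (-n).toNat = n.natAbs := by omega
    have e2 : (-n - 1).toNat = n.natAbs - 1 := by omega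
    rw [e1, e2]; rfl
  · rw [PySem.Int.band, if_pos (by omega), if_neg (by omega)]
    have e1 : n.toNat = n.natAbs := by omega
    have e2 : (-(-n) - 1).toNat = n.natAbs - 1 := by omega
    rw [e1, e2]; rfl

theorem floordiv_band_eq_halveA (n : Int) (h : n ≠ 0) :
    PySem.Int.floordiv n (PySem.Int.band n (-n)) = halveA n := by
  induction hN : n.natAbs using Nat.strong_induction_on generalizing n with
  | _ N ih =>
  subst hN
  rw [band_self_neg n h]
  by_cases hodd : n.natAbs % 2 = 1
  · have ha : n.natAbs &&& (n.natAbs - 1) = n.natAbs - 1 := nat_and_pred_odd _ hodd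
    have hg : gNat n.natAbs = 1 := by unfold gNat; omega
    rw [hg, PySem.Int.floordiv_eq_ediv_of_pos (by norm_num)]
    have hm : PySem.Int.mod n 2 ≠ 0 := by
      rw [PySem.Int.mod_eq_emod_of_pos (by norm_num)]
      omega
    rw [halveA_odd n hm]
    simp
  · have hdvd : (2:Int) ∣ n := by omega
    obtain ⟨q, rfl⟩ := hdvd
    have hq : q ≠ 0 := by rintro rfl; exact h (by ring)
    have habs : (2 * q).natAbs = 2 * q.natAbs := by
      simp [Int.natAbs_mul]
    have hkpos : 0 < q.natAbs := by omega
    have hg : gNat (2 * q).natAbs = 2 * gNat q.natAbs := by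
      rw [habs]
      have he := nat_and_pred_even q.natAbs hkpos
      have hle : q.natAbs &&& (q.natAbs - 1) ≤ q.natAbs := Nat.and_le_left
      have hle2 : (2 * q.natAbs) &&& (2 * q.natAbs - 1) ≤ 2 * q.natAbs := Nat.and_le_left
      unfold gNat
      omega
    rw [hg]
    have hgp : 0 < gNat q.natAbs := gNat_pos _ hkpos
    have hcast : ((2 * gNat q.natAbs : Nat) : Int) = 2 * ((gNat q.natAbs : Nat) : Int) := by push_cast; ring
    rw [hcast, PySem.Int.floordiv_eq_ediv_of_pos (by positivity), Int.mul_ediv_mul_of_pos _ _ (by norm_num)]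
    rw [← PySem.Int.floordiv_eq_ediv_of_pos (by exact_mod_cast hgp)]
    rw [← band_self_neg q hq]
    rw [ih q.natAbs (by omega) q hq rfl]
    -- halveA (2 * q) = halveA q
    conv_rhs => rw [halveA]
    have hc : (2 * q ≠ 0 ∧ PySem.Int.mod (2 * q) 2 = 0) := by
      refine ⟨h, ?_⟩
      rw [PySem.Int.mod_eq_zero_iff_dvd]
      exact ⟨q, rfl⟩
    rw [dif_pos hc, PySem.Int.floordiv_eq_ediv_of_pos (by norm_num),
        Int.mul_ediv_cancel_left _ (by norm_num)]

theorem norm_dict_eq (n : Int) (hn : n ≠ 0) :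
    (if PySem.Int.mod n 2 = 1 then n
     else PySem.Int.floordiv n (PySem.Int.band n (-n))) = halveA n := by
  split_ifs with h
  · exact (halveA_odd n (by omega)).symm
  · exact floordiv_band_eq_halveA n hn

-- ---- B's recording loop computes the duplicate-free prefix of trajFull ----

def dPrefix (P : List Int) : List Int → List Int
  | [] => []
  | v :: r => if v ∈ P then [] else v :: dPrefix (P ++ [v]) r

theorem dPrefix_nil (P : List Int) : dPrefix P [] = [] := rfl

theorem dPrefix_cons (P : List Int) (v : Int) (r : List Int) :
    dPrefix P (v :: r) = if v ∈ P then [] else v :: dPrefix (P ++ [v]) r := rfl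

theorem set_contains_add (s : PySem.Set Int) (v x : Int) :
    PySem.Set.contains (PySem.Set.add s v) x = (PySem.Set.contains s x || (x == v)) := by
  simp only [PySem.Set.contains, PySem.Set.add]
  split
  · rename_i h
    cases hx : (x == v)
    · simp
    · have : x = v := by simpa using hx
      subst this
      rw [List.contains_iff_mem] at h
      simp [h]
  · by_cases hxv : x = v
    · subst hxv
      simp
    · simp [hxv]

theorem dtrajGo_eq (f : Nat) : ∀ (cur : Int) (seen : PySem.Set Int) (out P : List Int),
    (∀ x : Int, PySem.Set.contains seen x = true ↔ x ∈ P) →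
    dtrajGo cur f seen out = out ++ dPrefix P (trajFull cur f) := by
  induction f with
  | zero => intro cur seen out P _; simp [dtrajGo, trajFull, dPrefix_nil]
  | succ f ih =>
    intro cur seen out P hinv
    rw [show dtrajGo cur (f + 1) seen out
          = (if PySem.Set.contains seen cur then out
             else if cur = 1 then out ++ [cur]
             else dtrajGo (halveA (3 * cur + 1)) f (PySem.Set.add seen cur) (out ++ [cur]))
        from rfl,
        show trajFull cur (f + 1) = cur :: (if cur = 1 then [] else trajFull (syracuseA cur) f)
        from rfl, dPrefix_cons]
    by_cases hc : PySem.Set.contains seen cur = true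
    · have hcp : cur ∈ P := (hinv cur).1 hc
      rw [if_pos hc, if_pos hcp]
      simp
    · have hcp : cur ∉ P := fun h => hc ((hinv cur).2 h)
      rw [if_neg (by simpa using hc), if_neg hcp]
      by_cases h1 : cur = 1
      · rw [if_pos h1, if_pos h1, dPrefix_nil]
      · rw [if_neg h1, if_neg h1]
        have hinv' : ∀ x : Int,
            PySem.Set.contains (PySem.Set.add seen cur) x = true ↔ x ∈ P ++ [cur] := by
          intro x
          rw [set_contains_add]
          constructor
          · intro hx
            rw [Bool.or_eq_true] at hx
            rcases hx with hx | hx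
            · exact List.mem_append.2 (Or.inl ((hinv x).1 hx))
            · have : x = cur := by simpa using hx
              subst this
              simp
          · intro hx
            rw [Bool.or_eq_true]
            rcases List.mem_append.1 hx with hx | hx
            · exact Or.inl ((hinv x).2 hx)
            · have : x = cur := by simpa using hx
              subst this
              simp
        rw [ih (halveA (3 * cur + 1)) (PySem.Set.add seen cur) (out ++ [cur]) (P ++ [cur]) hinv']
        have hs : halveA (3 * cur + 1) = syracuseA cur := rfl
        rw [hs]
        simp

theorem dPrefix_prefix : ∀ (t P : List Int), dPrefix P t <+: t := by
  intro t
  induction t with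
  | nil => intro P; simp [dPrefix_nil]
  | cons v r ih =>
    intro P
    rw [dPrefix_cons]
    split_ifs with h
    · exact List.nil_prefix
    · exact List.cons_prefix_cons.2 ⟨rfl, ih (P ++ [v])⟩

theorem dPrefix_length_le (t P : List Int) : (dPrefix P t).length ≤ t.length :=
  (dPrefix_prefix t P).length_le

theorem dPrefix_getD (t : List Int) : ∀ (P : List Int) (k : Nat), k < (dPrefix P t).length →
    (dPrefix P t).getD k 0 = t.getD k 0 := by
  induction t with
  | nil => intro P k hk; simp [dPrefix_nil] at hk
  | cons v r ih =>
    intro P k hk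
    by_cases h : v ∈ P
    · rw [dPrefix_cons, if_pos h] at hk
      simp at hk
    · rw [dPrefix_cons, if_neg h] at hk ⊢
      cases k with
      | zero => simp
      | succ k =>
        simp only [List.getD_cons_succ]
        exact ih (P ++ [v]) k (by simpa using hk)

theorem dPrefix_fresh : ∀ (t P : List Int),
    (∀ x ∈ dPrefix P t, x ∉ P) ∧ (dPrefix P t).Nodup := by
  intro t
  induction t with
  | nil => intro P; simp [dPrefix_nil]
  | cons v r ih =>
    intro P
    by_cases h : v ∈ P
    · rw [dPrefix_cons, if_pos h]
      simp
    · rw [dPrefix_cons, if_neg h]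
      obtain ⟨hfr, hnd⟩ := ih (P ++ [v])
      constructor
      · intro x hx
        rcases List.mem_cons.1 hx with rfl | hx
        · exact h
        · intro hxP
          exact hfr x hx (List.mem_append.2 (Or.inl hxP))
      · rw [List.nodup_cons]
        exact ⟨fun hv => hfr v hv (by simp), hnd⟩

theorem dPrefix_stop : ∀ (t P : List Int), dPrefix P t = t ∨
    ∃ w rest, t = dPrefix P t ++ w :: rest ∧ w ∈ P ++ dPrefix P t := by
  intro t
  induction t with
  | nil => intro P; exact Or.inl rfl
  | cons v r ih =>
    intro P
    by_cases h : v ∈ P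
    · right
      refine ⟨v, r, ?_, ?_⟩
      · rw [dPrefix_cons, if_pos h]
        simp
      · rw [dPrefix_cons, if_pos h]
        simpa using h
    · rw [dPrefix_cons, if_neg h]
      rcases ih (P ++ [v]) with he | ⟨w, rest, hsp, hw⟩
      · left
        rw [he]
      · right
        refine ⟨w, rest, by rw [List.cons_append, ← hsp], ?_⟩
        simp only [List.mem_append, List.mem_cons] at hw ⊢
        tauto

-- successor structure of trajFull: consecutive entries are Syracuse steps, 1 only at the end
theorem traj_step (f : Nat) : ∀ (c : Int) (k : Nat), k + 1 < (trajFull c f).length →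
    (trajFull c f).getD k 0 ≠ 1
      ∧ (trajFull c f).getD (k + 1) 0 = syracuseA ((trajFull c f).getD k 0) := by
  induction f with
  | zero => intro c k hk; simp [trajFull] at hk
  | succ f ih =>
    intro c k hk
    rw [show trajFull c (f + 1) = c :: (if c = 1 then [] else trajFull (syracuseA c) f)
        from rfl] at hk ⊢
    by_cases h1 : c = 1
    · rw [if_pos h1] at hk
      simp at hk
    · rw [if_neg h1] at hk ⊢
      cases k with
      | zero =>
        simp only [List.getD_cons_zero, List.getD_cons_succ]
        refine ⟨h1, ?_⟩
        cases f with
        | zero => simp [trajFull] at hk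
        | succ f' =>
          rw [show trajFull (syracuseA c) (f' + 1)
                = syracuseA c :: (if syracuseA c = 1 then []
                    else trajFull (syracuseA (syracuseA c)) f') from rfl]
          simp
      | succ k =>
        simp only [List.getD_cons_succ]
        exact ih (syracuseA c) k (by simpa using hk)

theorem closed_traj (f : Nat) : ∀ (c : Int) (S : List Int), c ∈ S →
    (∀ x ∈ S, x ≠ 1 → syracuseA x ∈ S) → ∀ v ∈ trajFull c f, v ∈ S := by
  induction f with
  | zero => intro c S _ _ v hv; simp [trajFull] at hv
  | succ f ih =>
    intro c S hc hcl v hv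
    rw [show trajFull c (f + 1) = c :: (if c = 1 then [] else trajFull (syracuseA c) f)
        from rfl] at hv
    rcases List.mem_cons.1 hv with rfl | hv
    · exact hc
    · by_cases h1 : c = 1
      · rw [if_pos h1] at hv
        simp at hv
      · rw [if_neg h1] at hv
        exact ih (syracuseA c) S (hcl c hc h1) hcl v hv

-- the whole trajectory is covered by its duplicate-free prefix (once a value repeats, the
-- deterministic sequence only revisits earlier values)
theorem dPrefix_cover (F : Nat) (c : Int) :
    ∀ v ∈ trajFull c F, v ∈ dPrefix [] (trajFull c F) := by
  intro v hv
  rcases dPrefix_stop (trajFull c F) [] with he | ⟨w, rest, hsp, hw⟩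
  · rw [he]
    exact hv
  · have hwD : w ∈ dPrefix [] (trajFull c F) := by simpa using hw
    set T := trajFull c F with hT
    set D := dPrefix [] T with hD
    have hpre : D <+: T := dPrefix_prefix T []
    have hnd : D.Nodup := (dPrefix_fresh T []).2
    have hDlen : 0 < D.length := List.length_pos_of_mem hwD
    have hTlen : D.length ≤ T.length := hpre.length_le
    have hDgetD : ∀ k, k < D.length → D.getD k 0 = T.getD k 0 := fun k hk =>
      dPrefix_getD T [] k hk
    have hT0 : T.getD 0 0 = c := by
      cases hF : F with
      | zero =>
        exfalso
        have hTnil : T = [] := by rw [hT, hF]; rfl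
        rw [hTnil] at hTlen
        simp only [List.length_nil, Nat.le_zero] at hTlen
        omega
      | succ F' =>
        rw [hT, hF, show trajFull c (F' + 1)
              = c :: (if c = 1 then [] else trajFull (syracuseA c) F') from rfl]
        simp
    have hcD : c ∈ D := by
      rw [← hT0, ← hDgetD 0 hDlen, List.getD_eq_getElem D 0 hDlen]
      exact List.getElem_mem _
    have hclosed : ∀ x ∈ D, x ≠ 1 → syracuseA x ∈ D := by
      intro x hx _
      obtain ⟨k, hk, hxk⟩ := List.mem_iff_getElem.1 hx
      have hkD : D.getD k 0 = x := by rw [List.getD_eq_getElem D 0 hk, hxk]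
      have hkT : T.getD k 0 = x := by rw [← hDgetD k hk, hkD]
      have hk1T : k + 1 < T.length := by
        rw [hsp, List.length_append, List.length_cons]
        omega
      have hstep := traj_step F c k (by rw [← hT]; exact hk1T)
      rw [← hT] at hstep
      rw [hkT] at hstep
      have hnext : T.getD (k + 1) 0 = syracuseA x := hstep.2
      by_cases hk1 : k + 1 < D.length
      · rw [← hDgetD (k + 1) hk1] at hnext
        rw [← hnext, List.getD_eq_getElem D 0 hk1]
        exact List.getElem_mem _
      · have hkeq : k + 1 = D.length := by omega
        have hww : T.getD (k + 1) 0 = w := by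
          rw [hsp, hkeq, List.getD_append_right D (w :: rest) 0 D.length (le_refl _)]
          simp
        have : syracuseA x = w := by rw [← hnext, hww]
        rw [this]
        exact hwD
    exact closed_traj F c D hcD hclosed v hv

-- a first-occurrence index in the trajectory lies inside its duplicate-free prefix
theorem firstIdx_lt (c : Int) (F : Nat) (v : Int) (k : Nat)
    (h : (trajFull c F).findIdx? (· == v) = some k) :
    k < (dPrefix [] (trajFull c F)).length ∧ (dPrefix [] (trajFull c F)).getD k 0 = v := by
  rw [List.findIdx?_eq_some_iff_getElem] at h
  obtain ⟨hkT, hbeq, hmin⟩ := h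
  have hvk : (trajFull c F)[k] = v := by simpa using hbeq
  have hvT : v ∈ trajFull c F := by
    rw [← hvk]
    exact List.getElem_mem _
  obtain ⟨m, hm, hmv⟩ := List.mem_iff_getElem.1 (dPrefix_cover F c v hvT)
  have hmlen : m < (trajFull c F).length := lt_of_lt_of_le hm (dPrefix_length_le _ _)
  have hmT : (trajFull c F)[m] = v := by
    have hgd := dPrefix_getD (trajFull c F) [] m hm
    rw [List.getD_eq_getElem _ 0 hm, List.getD_eq_getElem _ 0 hmlen] at hgd
    rw [← hgd, hmv]
  have hkm : k ≤ m := by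
    by_contra hc
    push_neg at hc
    exact hmin m hc (by simp [hmT])
  refine ⟨by omega, ?_⟩
  rw [dPrefix_getD (trajFull c F) [] k (by omega), List.getD_eq_getElem _ 0 hkT, hvk]

-- conversely, every index of the duplicate-free prefix is the first occurrence of its value
theorem firstIdx_of_idx (c : Int) (F : Nat) (i : Nat)
    (hi : i < (dPrefix [] (trajFull c F)).length) :
    (trajFull c F).findIdx? (· == (dPrefix [] (trajFull c F)).getD i 0) = some i := by
  have hiT : i < (trajFull c F).length := lt_of_lt_of_le hi (dPrefix_length_le _ _)
  rw [List.findIdx?_eq_some_iff_getElem]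
  refine ⟨hiT, ?_, ?_⟩
  · simp only [beq_iff_eq]
    rw [dPrefix_getD _ [] i hi, List.getD_eq_getElem _ 0 hiT]
  · intro m hm
    simp only [beq_iff_eq]
    intro he
    have hmD : m < (dPrefix [] (trajFull c F)).length := lt_trans hm hi
    have hmT : m < (trajFull c F).length := lt_of_lt_of_le hmD (dPrefix_length_le _ _)
    have h1 : (dPrefix [] (trajFull c F))[m]'hmD = (trajFull c F)[m] := by
      have hgd := dPrefix_getD (trajFull c F) [] m hmD
      rw [List.getD_eq_getElem _ 0 hmD, List.getD_eq_getElem _ 0 hmT] at hgd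
      exact hgd
    have h2 : (dPrefix [] (trajFull c F))[i]'hi
        = (dPrefix [] (trajFull c F)).getD i 0 := (List.getD_eq_getElem _ 0 hi).symm
    have hnd := (dPrefix_fresh (trajFull c F) []).2
    have : (dPrefix [] (trajFull c F))[m]'hmD = (dPrefix [] (trajFull c F))[i]'hi := by
      rw [h1, h2, he]
    exact absurd ((List.Nodup.getElem_inj_iff hnd).mp this) (by omega)

-- ---- A's dict as first-occurrence index lookup on trajFull ----

theorem odGoA_get? (f : Nat) : ∀ (c i : Int) (d : PySem.Dict Int Int) (v : Int),
    (odGoA c f i d).get? v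
      = (d.get? v).or (((trajFull c f).findIdx? (· == v)).map (fun k => i + (k : Int))) := by
  induction f with
  | zero => intro c i d v; simp [odGoA, trajFull]
  | succ f ih =>
    intro c i d v
    rw [show odGoA c (f + 1) i d
          = (if c = 1 then (if d.contains c = false then d.insert c i else d)
             else odGoA (syracuseA c) f (i + 1) (if d.contains c = false then d.insert c i else d))
        from rfl,
        show trajFull c (f + 1) = c :: (if c = 1 then [] else trajFull (syracuseA c) f) from rfl,
        List.findIdx?_cons]
    have hA : (if d.contains c = false then d.insert c i else d).get? c
        = if d.contains c = false then some i else d.get? c := by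
      split <;> simp [PySem.Dict.get?_insert_self]
    have hB : v ≠ c → (if d.contains c = false then d.insert c i else d).get? v = d.get? v := by
      intro hvc
      split
      · rw [PySem.Dict.get?_insert]
        simp [hvc]
      · rfl
    by_cases h1 : c = 1
    · subst h1
      rw [if_pos rfl, if_pos rfl]
      by_cases hv : v = (1 : Int)
      · subst hv
        rw [hA]
        rw [if_pos (show ((1:Int) == (1:Int)) = true by simp)]
        by_cases hc : d.contains (1:Int) = false
        · have hget : d.get? (1:Int) = none := by
            rw [PySem.Dict.contains_eq_isSome_get?] at hc
            simpa using hc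
          simp [hc, hget]
        · have hsome : (d.get? (1:Int)).isSome = true := by
            rw [PySem.Dict.contains_eq_isSome_get?] at hc
            simp only [Bool.not_eq_false] at hc
            exact hc
          obtain ⟨w, hw⟩ := Option.isSome_iff_exists.1 hsome
          simp [hc, hw]
      · rw [hB hv]
        have : ((1:Int) == v) = false := by simpa using fun h => hv h.symm
        simp [this]
    · rw [if_neg h1, if_neg h1, ih]
      by_cases hv : v = c
      · subst hv
        rw [if_pos (show (v == v) = true by simp)]
        by_cases hc : d.contains v = false
        · have hget : d.get? v = none := by
            rw [PySem.Dict.contains_eq_isSome_get?] at hc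
            simpa using hc
          rw [hA]
          simp [hc, hget]
        · have hsome : (d.get? v).isSome = true := by
            rw [PySem.Dict.contains_eq_isSome_get?] at hc
            simp only [Bool.not_eq_false] at hc
            exact hc
          obtain ⟨w, hw⟩ := Option.isSome_iff_exists.1 hsome
          rw [hA]
          simp [hc, hw]
      · rw [hB hv]
        have hbc : (c == v) = false := by simpa using fun h => hv h.symm
        rw [hbc, if_neg (by simp)]
        congr 1
        rcases (trajFull (syracuseA c) f).findIdx? (· == v) with _ | k
        · rfl
        · simp
          push_cast
          ring

-- ---- A's running-best fold: filter then min + first argmin ----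

def tot (orb1 : PySem.Dict Int Int) (p : Int × Int) : Int := orb1.getD p.2 0 + p.1

theorem cfm_filter (orb1 : PySem.Dict Int Int) :
    ∀ (l : List (Int × Int)) (acc : Option Int × Option Int),
      l.foldl (cfmStep orb1) acc =
        (l.filter (fun p => (orb1.get? p.2).isSome)).foldl (cfmStep orb1) acc := by
  intro l
  induction l with
  | nil => intro acc; rfl
  | cons p l ih =>
    intro acc
    by_cases hp : (orb1.get? p.2).isSome
    · simp [List.filter_cons, hp, ih]
    · have hnone : orb1.get? p.2 = none := Option.not_isSome_iff_eq_none.1 hp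
      simp [List.filter_cons, hp, ih, cfmStep, hnone]

theorem min?_cons_int (x : Int) (t : List Int) :
    (x :: t).min? = some (match t.min? with | none => x | some m => min x m) := by
  rw [List.min?_cons]
  cases t.min? <;> rfl

theorem cfm_char (orb1 : PySem.Dict Int Int) :
    ∀ (l : List (Int × Int)) (b : Int) (m : Option Int),
      (∀ p ∈ l, (orb1.get? p.2).isSome = true) →
      l.foldl (cfmStep orb1) (some b, m) =
        match (l.map (tot orb1)).min? with
        | none => (some b, m)
        | some T => if T < b then (some T, (l.find? (fun p => tot orb1 p == T)).map (·.2))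
                    else (some b, m) := by
  intro l
  induction l with
  | nil => intro b m _; rfl
  | cons p l ih =>
    intro b m h
    obtain ⟨s, horb⟩ := Option.isSome_iff_exists.1 (h p List.mem_cons_self)
    have htot : tot orb1 p = s + p.1 := by
      unfold tot; rw [PySem.Dict.getD_eq_get?_getD, horb]; rfl
    have hstep : cfmStep orb1 (some b, m) p
        = if s + p.1 < b then (some (s + p.1), some p.2) else (some b, m) := by
      simp [cfmStep, horb]
    have h' : ∀ q ∈ l, (orb1.get? q.2).isSome = true := fun q hq => h q (List.mem_cons_of_mem _ hq)
    rw [List.foldl_cons, hstep, List.map_cons, min?_cons_int]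
    by_cases hlt : s + p.1 < b
    · rw [if_pos hlt, ih _ _ h']
      cases hm : (l.map (tot orb1)).min? with
      | none =>
        dsimp only
        have : tot orb1 p < b := by omega
        rw [if_pos this, List.find?_cons_of_pos (by simp [htot])]
        simp [htot]
      | some T' =>
        dsimp only
        by_cases hT : T' < s + p.1
        · have e1 : min (tot orb1 p) T' = T' := by rw [htot]; omega
          rw [if_pos hT, e1, if_pos (by omega),
              List.find?_cons_of_neg (by simp [htot]; omega)]
        · have e1 : min (tot orb1 p) T' = tot orb1 p := by rw [htot]; omega
          rw [if_neg hT, e1, if_pos (by omega),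
              List.find?_cons_of_pos (by simp [htot])]
          simp [htot]
    · rw [if_neg hlt, ih _ _ h']
      cases hm : (l.map (tot orb1)).min? with
      | none =>
        dsimp only
        rw [if_neg (by omega)]
      | some T' =>
        dsimp only
        by_cases hT : T' < b
        · have e1 : min (tot orb1 p) T' = T' := by rw [htot]; omega
          rw [if_pos hT, e1, if_pos (by omega),
              List.find?_cons_of_neg (by simp [htot]; omega)]
        · have e2 : ¬ min (tot orb1 p) T' < b := by rw [htot]; omega
          rw [if_neg hT, if_neg e2]

theorem cfm_char0 (orb1 : PySem.Dict Int Int) (l : List (Int × Int))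
    (h : ∀ p ∈ l, (orb1.get? p.2).isSome = true) :
    l.foldl (cfmStep orb1) (none, none) =
      ((l.map (tot orb1)).min?,
        (l.find? (fun p => tot orb1 p == ((l.map (tot orb1)).min?).getD 0)).map (·.2)) := by
  cases l with
  | nil => rfl
  | cons p l =>
    obtain ⟨s, horb⟩ := Option.isSome_iff_exists.1 (h p List.mem_cons_self)
    have htot : tot orb1 p = s + p.1 := by
      unfold tot; rw [PySem.Dict.getD_eq_get?_getD, horb]; rfl
    have hstep : cfmStep orb1 (none, none) p = (some (s + p.1), some p.2) := by
      simp [cfmStep, horb]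
    have h' : ∀ q ∈ l, (orb1.get? q.2).isSome = true := fun q hq => h q (List.mem_cons_of_mem _ hq)
    rw [List.foldl_cons, hstep, cfm_char orb1 l (s + p.1) (some p.2) h',
        List.map_cons, min?_cons_int]
    cases hm : (l.map (tot orb1)).min? with
    | none =>
      dsimp only
      rw [List.find?_cons_of_pos (by simp [htot])]
      simp [htot]
    | some T' =>
      dsimp only
      by_cases hT : T' < s + p.1
      · have e1 : min (tot orb1 p) T' = T' := by rw [htot]; omega
        rw [if_pos hT, e1]
        simp only [Option.getD_some]
        rw [List.find?_cons_of_neg (by simp [htot]; omega)]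
      · have e1 : min (tot orb1 p) T' = tot orb1 p := by rw [htot]; omega
        rw [if_neg hT, e1]
        simp only [Option.getD_some]
        rw [List.find?_cons_of_pos (by simp [htot])]
        simp [htot]

theorem cfm_empty : ∀ (l : List (Int × Int)) (acc : Option Int × Option Int),
    l.foldl (cfmStep PySem.Dict.empty) acc = acc := by
  intro l
  induction l with
  | nil => intro acc; rfl
  | cons p l ih =>
    intro acc
    rw [List.foldl_cons]
    have hstep : cfmStep PySem.Dict.empty acc p = acc := by
      simp [cfmStep, PySem.Dict.get?_empty]
    rw [hstep, ih]

-- ---- B's nested loops as find? over ranges ----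

theorem diagInner_eq (t1 t2 : List Int) (t : Int) :
    ∀ js : List Int,
      diagInner t1 t2 t js
        = (js.find? (fun j =>
              PySem.List.pyGetD t1 (t - j) 0 == PySem.List.pyGetD t2 j 0)).map
            (fun j => (t, PySem.List.pyGetD t2 j 0)) := by
  intro js
  induction js with
  | nil => rfl
  | cons j js ih =>
    rw [show diagInner t1 t2 t (j :: js)
          = if PySem.List.pyGetD t1 (t - j) 0 == PySem.List.pyGetD t2 j 0 then
              some (t, PySem.List.pyGetD t2 j 0)
            else diagInner t1 t2 t js from rfl, List.find?_cons]
    cases h : (PySem.List.pyGetD t1 (t - j) 0 == PySem.List.pyGetD t2 j 0) <;>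
      simp [h, ih]

theorem diagOuter_skip (t1 t2 : List Int) :
    ∀ ts1 ts2 : List Int,
      (∀ t ∈ ts1, diagInner t1 t2 t
          (PySem.List.pyRange (max 0 (t - PySem.List.len t1 + 1))
            (min t (PySem.List.len t2 - 1) + 1) 1) = none) →
      diagOuter t1 t2 (ts1 ++ ts2) = diagOuter t1 t2 ts2 := by
  intro ts1
  induction ts1 with
  | nil => intro ts2 _; rfl
  | cons t ts ih =>
    intro ts2 h
    rw [List.cons_append,
        show diagOuter t1 t2 (t :: (ts ++ ts2))
          = match diagInner t1 t2 t
                (PySem.List.pyRange (max 0 (t - PySem.List.len t1 + 1))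
                  (min t (PySem.List.len t2 - 1) + 1) 1) with
            | some r => some r
            | none => diagOuter t1 t2 (ts ++ ts2) from rfl,
        h t List.mem_cons_self]
    exact ih ts2 (fun u hu => h u (List.mem_cons_of_mem _ hu))

-- a hit of B corresponds to an element of A's filtered candidate list, with total t
theorem hit_memD (c1 c2 : Int) (F1 F2 : Nat) (d1 : PySem.Dict Int Int)
    (hd1 : ∀ v, d1.get? v = ((trajFull c1 F1).findIdx? (· == v)).map (fun k => ((k : Nat) : Int)))
    (t j : Int) (hj0 : 0 ≤ j) (hj : j.toNat < (dPrefix [] (trajFull c2 F2)).length)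
    (hi0 : 0 ≤ t - j) (hi : (t - j).toNat < (dPrefix [] (trajFull c1 F1)).length)
    (h : (PySem.List.pyGetD (dPrefix [] (trajFull c1 F1)) (t - j) 0
        == PySem.List.pyGetD (dPrefix [] (trajFull c2 F2)) j 0) = true) :
    ((j, (dPrefix [] (trajFull c2 F2)).getD j.toNat 0)
        ∈ (PySem.List.enumerate (trajFull c2 F2) 0).filter (fun p => (d1.get? p.2).isSome))
    ∧ tot d1 (j, (dPrefix [] (trajFull c2 F2)).getD j.toNat 0) = t := by
  rw [PySem.List.pyGetD_of_nonneg _ _ hi0, PySem.List.pyGetD_of_nonneg _ _ hj0] at h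
  have heq : (dPrefix [] (trajFull c1 F1)).getD (t - j).toNat 0
      = (dPrefix [] (trajFull c2 F2)).getD j.toNat 0 := by simpa using h
  have hfi : (trajFull c1 F1).findIdx? (· == (dPrefix [] (trajFull c2 F2)).getD j.toNat 0)
      = some (t - j).toNat := by
    rw [← heq]
    exact firstIdx_of_idx c1 F1 (t - j).toNat hi
  have hjT : j.toNat < (trajFull c2 F2).length := lt_of_lt_of_le hj (dPrefix_length_le _ _)
  have hval : (dPrefix [] (trajFull c2 F2)).getD j.toNat 0 = (trajFull c2 F2)[j.toNat] := by
    rw [dPrefix_getD _ [] j.toNat hj, List.getD_eq_getElem _ 0 hjT]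
  constructor
  · apply List.mem_filter.2
    refine ⟨?_, ?_⟩
    · rw [PySem.List.mem_enumerate_iff]
      refine ⟨j.toNat, hjT, ?_⟩
      rw [hval]
      have h0 : j = 0 + ((j.toNat : Nat) : Int) := by omega
      rw [← h0]
    · rw [hd1, hfi]
      rfl
  · unfold tot
    rw [PySem.Dict.getD_eq_get?_getD, hd1, hfi]
    simp
    omega

-- every element of A's candidate list is an enumerated value with a first-occurrence index
theorem mem_l_elim (T1 T2 : List Int) (d1 : PySem.Dict Int Int)
    (hd1 : ∀ v, d1.get? v = (T1.findIdx? (· == v)).map (fun k => ((k : Nat) : Int)))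
    (p : Int × Int)
    (hp : p ∈ (PySem.List.enumerate T2 0).filter (fun p => (d1.get? p.2).isSome)) :
    ∃ (jj k : Nat), jj < T2.length ∧ k < T1.length ∧ p.1 = (jj : Int) ∧ p.2 = T2.getD jj 0
      ∧ T1.findIdx? (· == T2.getD jj 0) = some k ∧ tot d1 p = (k : Int) + (jj : Int) := by
  obtain ⟨hmem, hsome⟩ := List.mem_filter.1 hp
  rw [PySem.List.mem_enumerate_iff] at hmem
  obtain ⟨jj, hjj, hpeq⟩ := hmem
  have hp2 : p.2 = T2.getD jj 0 := by
    rw [hpeq, List.getD_eq_getElem T2 0 hjj]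
  have hs2 : (T1.findIdx? (· == p.2)).isSome = true := by
    rw [hd1] at hsome
    simpa using hsome
  obtain ⟨k, hk⟩ := Option.isSome_iff_exists.1 hs2
  have hklen : k < T1.length := by
    rw [List.findIdx?_eq_some_iff_getElem] at hk
    exact hk.1
  refine ⟨jj, k, hjj, hklen, by rw [hpeq]; simp, hp2, by rw [← hp2]; exact hk, ?_⟩
  unfold tot
  rw [PySem.Dict.getD_eq_get?_getD, hd1, hk]
  simp
  rw [hpeq]
  simp

-- find? over an ascending integer range: none / first hit
theorem find?_pyRange_none (p : Int → Bool) (a b : Int)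
    (h : ∀ x, a ≤ x → x < b → p x = false) :
    (PySem.List.pyRange a b 1).find? p = none := by
  rw [List.find?_eq_none]
  intro x hx
  rw [PySem.List.mem_pyRange_one] at hx
  simp [h x hx.1 hx.2]

theorem find?_pyRange_first (p : Int → Bool) (a b j : Int) (haj : a ≤ j) (hjb : j < b)
    (hfail : ∀ x, a ≤ x → x < j → p x = false) (hj : p j = true) :
    (PySem.List.pyRange a b 1).find? p = some j := by
  rw [PySem.List.pyRange_one_append a j b haj (le_of_lt hjb), List.find?_append,
      find?_pyRange_none p a j hfail, Option.none_or, PySem.List.pyRange_one_cons hjb,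
      List.find?_cons_of_pos hj]

-- the first match in a Pairwise-ordered list bounds every other match
theorem find?_first {α : Type} (l : List α) (p : α → Bool) (R : α → α → Prop) (hpw : l.Pairwise R)
    (b : α) (h : l.find? p = some b) : ∀ x ∈ l, p x = true → x = b ∨ R b x := by
  rw [List.find?_eq_some_iff_append] at h
  obtain ⟨hb, l1, l2, rfl, hfail⟩ := h
  intro x hx hpx
  rcases List.mem_append.1 hx with hx1 | hx2
  · have := hfail x hx1
    rw [hpx] at this
    cases this
  · rcases List.mem_cons.1 hx2 with rfl | hx3
    · exact Or.inl rfl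
    · right
      have h2 := (List.pairwise_append.1 hpw).2.1
      exact List.rel_of_pairwise_cons h2 hx3

-- ===== main equivalence =====

theorem main_eq (n1 n2 ms : Int) (h1 : n1 ≠ 0) (h2 : n2 ≠ 0) :
    confluence_time_min n1 n2 ms = confluence_time_min_alt n1 n2 ms := by
  rw [confluence_time_min, confluence_time_min_alt]
  by_cases hms : 0 ≤ ms
  · set T1 := trajFull (halveA n1) ms.toNat with hT1
    set T2 := trajFull (halveA n2) (ms.toNat + 1) with hT2
    set D1 := dPrefix [] T1 with hD1
    set D2 := dPrefix [] T2 with hD2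
    set d1 := orbitDictA n1 ms with hd1d
    have hlen1 : PySem.List.len D1 = (D1.length : Int) := PySem.List.len_eq _
    have hlen2 : PySem.List.len D2 = (D2.length : Int) := PySem.List.len_eq _
    have horb2 : orbitA n2 ms = T2 := by
      rw [orbitA, norm_orbit_eq n2, orbitGoA_eq, hT2, trajFull_succ]
      rfl
    have hd1 : ∀ v, d1.get? v = (T1.findIdx? (· == v)).map (fun k => ((k : Nat) : Int)) := by
      intro v
      rw [hd1d, orbitDictA, norm_dict_eq n1 h1, odGoA_get?, PySem.Dict.get?_empty,
          Option.none_or, ← hT1]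
      cases hx : T1.findIdx? (· == v) <;> simp [hx]
    have hempty_inv : ∀ x : Int,
        PySem.Set.contains PySem.Set.empty x = true ↔ x ∈ ([] : List Int) := by
      intro x
      simp [show PySem.Set.contains PySem.Set.empty x = false from rfl]
    have hT1B : trajB n1 ms = D1 := by
      rw [trajB, dtrajGo_eq ms.toNat (halveA n1) PySem.Set.empty [] [] hempty_inv]
      simp [hD1, hT1]
    have hT2B : trajB n2 (ms + 1) = D2 := by
      rw [trajB]
      have he : (ms + 1).toNat = ms.toNat + 1 := by omega
      rw [he, dtrajGo_eq (ms.toNat + 1) (halveA n2) PySem.Set.empty [] [] hempty_inv]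
      simp [hD2, hT2]
    rw [horb2, hT1B, hT2B]
    set l := (PySem.List.enumerate T2 0).filter (fun p => (d1.get? p.2).isSome) with hl
    have hall : ∀ p ∈ l, (d1.get? p.2).isSome = true := fun p hp => (List.mem_filter.1 hp).2
    rw [cfm_filter, ← hl, cfm_char0 d1 l hall, hlen1, hlen2]
    have hwin : ∀ t x : Int, max 0 (t - PySem.List.len D1 + 1) ≤ x →
        x < min t (PySem.List.len D2 - 1) + 1 →
        (PySem.List.pyGetD D1 (t - x) 0 == PySem.List.pyGetD D2 x 0) = true →
        ((x, D2.getD x.toNat 0) ∈ l ∧ tot d1 (x, D2.getD x.toNat 0) = t) := by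
      intro t x hlo hhi hx
      rw [hlen1] at hlo
      rw [hlen2] at hhi
      have b1 : 0 ≤ x := by omega
      have b2 : x.toNat < D2.length := by omega
      have b3 : 0 ≤ t - x := by omega
      have b4 : (t - x).toNat < D1.length := by omega
      exact hit_memD (halveA n1) (halveA n2) ms.toNat (ms.toNat + 1) d1 hd1 t x b1 b2 b3 b4 hx
    cases hmin : (l.map (tot d1)).min? with
    | none =>
      have hle : l = [] := by
        have h0 := List.min?_eq_none_iff.1 hmin
        simpa using h0
      have hnone : diagOuter D1 D2
          (PySem.List.pyRange 0 ((D1.length : Int) + (D2.length : Int) - 1) 1) = none := by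
        have hskip := diagOuter_skip D1 D2
            (PySem.List.pyRange 0 ((D1.length : Int) + (D2.length : Int) - 1) 1) []
            (by
              intro t _
              rw [diagInner_eq]
              have hfn : (PySem.List.pyRange (max 0 (t - PySem.List.len D1 + 1))
                  (min t (PySem.List.len D2 - 1) + 1) 1).find?
                    (fun j => PySem.List.pyGetD D1 (t - j) 0
                      == PySem.List.pyGetD D2 j 0) = none := by
                apply find?_pyRange_none
                intro x hlo hhi
                by_contra hx
                have hxt : (PySem.List.pyGetD D1 (t - x) 0
                    == PySem.List.pyGetD D2 x 0) = true := by
                  cases hxx : (PySem.List.pyGetD D1 (t - x) 0 == PySem.List.pyGetD D2 x 0)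
                  · exact absurd hxx hx
                  · rfl
                have hm := (hwin t x hlo hhi hxt).1
                rw [hle] at hm
                simp at hm
              rw [hfn]
              rfl)
        simpa using hskip
      rw [hnone]
    | some Tst =>
      have hTmem : Tst ∈ l.map (tot d1) := List.min?_mem hmin
      have hTle : ∀ x ∈ l.map (tot d1), Tst ≤ x := by
        rw [List.min?_eq_some_iff] at hmin
        · exact hmin.2
      obtain ⟨p0, hp0l, hp0t⟩ := List.mem_map.1 hTmem
      have hfs : (l.find? (fun p => tot d1 p == Tst)).isSome :=
        List.find?_isSome.2 ⟨p0, hp0l, by simp [hp0t]⟩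
      obtain ⟨q, hq⟩ := Option.isSome_iff_exists.1 hfs
      have hql : q ∈ l := List.mem_of_find?_eq_some hq
      have hqp : tot d1 q = Tst := by simpa using List.find?_some hq
      obtain ⟨jj0, k0, hjj0, hk0len, hq1, hq2, hfidx, htotq⟩ :=
        mem_l_elim T1 T2 d1 hd1 q hql
      have hT : Tst = (k0 : Int) + (jj0 : Int) := by rw [← hqp, htotq]
      have hpw : l.Pairwise (fun a b => a.1 < b.1) :=
        List.Pairwise.filter _ (PySem.List.pairwise_lt_enumerate T2 0)
      have hfirst : ∀ x ∈ l, tot d1 x = Tst → q.1 ≤ x.1 := by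
        intro x hx hxt
        rcases find?_first l _ _ hpw q hq x hx (by simp [hxt]) with rfl | hlt
        · exact le_refl _
        · exact le_of_lt hlt
      -- q's index is the FIRST occurrence of its value in T2 (else an earlier occurrence would
      -- yield a smaller total), hence it lies inside the duplicate-free prefix D2
      have hv2T : q.2 ∈ T2 := by
        rw [hq2, List.getD_eq_getElem _ 0 hjj0]
        exact List.getElem_mem _
      have hfs2 : T2.findIdx? (· == q.2) ≠ none := by
        intro hn
        have hall2 := List.findIdx?_eq_none_iff.mp hn
        have := hall2 q.2 hv2T
        simp at this
      obtain ⟨j', hj'⟩ := Option.ne_none_iff_exists'.mp hfs2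
      rw [List.findIdx?_eq_some_iff_getElem] at hj'
      obtain ⟨hj'T, hbeq', hmin'⟩ := hj'
      have hv' : T2[j'] = q.2 := by simpa using hbeq'
      have hq2e : q.2 = T2[jj0] := by rw [hq2, List.getD_eq_getElem _ 0 hjj0]
      have hj'le : j' ≤ jj0 := by
        by_contra hc
        push_neg at hc
        exact hmin' jj0 hc (by simp [← hq2e])
      have hp'mem : ((j' : Int), q.2) ∈ l := by
        apply List.mem_filter.2
        refine ⟨?_, ?_⟩
        · rw [PySem.List.mem_enumerate_iff]
          refine ⟨j', hj'T, ?_⟩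
          rw [hv']
          simp
        · rw [hd1, hq2, hfidx]
          rfl
      have htot' : tot d1 ((j' : Int), q.2) = (k0 : Int) + (j' : Int) := by
        unfold tot
        rw [PySem.Dict.getD_eq_get?_getD, hd1]
        dsimp only
        rw [hq2, hfidx]
        simp
      have hTle' := hTle _ (List.mem_map_of_mem hp'mem)
      rw [htot'] at hTle'
      have hfirst' := hfirst _ hp'mem (by
        rw [htot']
        have hc : ((j' : Nat) : Int) ≤ ((jj0 : Nat) : Int) := by exact_mod_cast hj'le
        omega)
      have hjj0' : jj0 = j' := by
        rw [hq1] at hfirst'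
        have h1' : ((jj0 : Nat) : Int) ≤ ((j' : Nat) : Int) := hfirst'
        omega
      have hjj0D : jj0 < D2.length := by
        obtain ⟨m, hm, hmv⟩ := List.mem_iff_getElem.1 (dPrefix_cover (ms.toNat + 1) (halveA n2) q.2 hv2T)
        have hmT : m < T2.length := lt_of_lt_of_le hm (dPrefix_length_le _ _)
        have hTm : T2[m] = q.2 := by
          have hgd := dPrefix_getD T2 [] m hm
          rw [List.getD_eq_getElem _ 0 hm, List.getD_eq_getElem _ 0 hmT] at hgd
          rw [← hgd]
          exact hmv
        have hj'm : j' ≤ m := by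
          by_contra hc
          push_neg at hc
          exact hmin' m hc (by simp [hTm])
        have hm2 : m < D2.length := hm
        omega
      have hq2D : D2.getD jj0 0 = q.2 := by
        rw [dPrefix_getD T2 [] jj0 hjj0D]
        exact hq2.symm
      obtain ⟨hk0D, hk0v⟩ := firstIdx_lt (halveA n1) ms.toNat (T2.getD jj0 0) k0 hfidx
      have hTpos : 0 ≤ Tst := by rw [hT]; positivity
      have hk' : ((k0 : Nat) : Int) < (D1.length : Int) := by exact_mod_cast hk0D
      have hj2' : ((jj0 : Nat) : Int) < (D2.length : Int) := by exact_mod_cast hjj0D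
      have hTlt : Tst < (D1.length : Int) + (D2.length : Int) - 1 := by
        rw [hT]
        omega
      have hskip : ∀ t ∈ PySem.List.pyRange 0 Tst 1,
          diagInner D1 D2 t
            (PySem.List.pyRange (max 0 (t - PySem.List.len D1 + 1))
              (min t (PySem.List.len D2 - 1) + 1) 1) = none := by
        intro t ht
        rw [PySem.List.mem_pyRange_one] at ht
        rw [diagInner_eq]
        have hfn : (PySem.List.pyRange (max 0 (t - PySem.List.len D1 + 1))
            (min t (PySem.List.len D2 - 1) + 1) 1).find?
              (fun j => PySem.List.pyGetD D1 (t - j) 0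
                == PySem.List.pyGetD D2 j 0) = none := by
          apply find?_pyRange_none
          intro x hlo hhi
          by_contra hx
          have hxt : (PySem.List.pyGetD D1 (t - x) 0
              == PySem.List.pyGetD D2 x 0) = true := by
            cases hxx : (PySem.List.pyGetD D1 (t - x) 0 == PySem.List.pyGetD D2 x 0)
            · exact absurd hxx hx
            · rfl
          obtain ⟨hm, hmt⟩ := hwin t x hlo hhi hxt
          have := hTle t (by
            rw [← hmt]
            exact List.mem_map_of_mem hm)
          omega
        rw [hfn]
        rfl
      have hinner : diagInner D1 D2 Tst
          (PySem.List.pyRange (max 0 (Tst - PySem.List.len D1 + 1))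
              (min Tst (PySem.List.len D2 - 1) + 1) 1) = some (Tst, q.2) := by
        rw [diagInner_eq]
        have hff : (PySem.List.pyRange (max 0 (Tst - PySem.List.len D1 + 1))
            (min Tst (PySem.List.len D2 - 1) + 1) 1).find?
              (fun j => PySem.List.pyGetD D1 (Tst - j) 0
                == PySem.List.pyGetD D2 j 0) = some q.1 := by
          apply find?_pyRange_first
          · rw [hlen1, hq1, hT]
            omega
          · rw [hlen2, hq1, hT]
            omega
          · intro x hlo hxq
            by_contra hx
            have hxt : (PySem.List.pyGetD D1 (Tst - x) 0
                == PySem.List.pyGetD D2 x 0) = true := by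
              cases hxx : (PySem.List.pyGetD D1 (Tst - x) 0 == PySem.List.pyGetD D2 x 0)
              · exact absurd hxx hx
              · rfl
            have hhi2 : x < min Tst (PySem.List.len D2 - 1) + 1 := by
              rw [hlen2]
              rw [hq1] at hxq
              omega
            obtain ⟨hm, hmt⟩ := hwin Tst x hlo hhi2 hxt
            have hge := hfirst _ hm hmt
            rw [hq1] at hge hxq
            simp at hge
            omega
          · have e2 : Tst - ((jj0 : Nat) : Int) = ((k0 : Nat) : Int) := by
              rw [hT]
              ring
            rw [hq1, e2, PySem.List.pyGetD_natCast, PySem.List.pyGetD_natCast]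
            rw [show D1.getD k0 0 = T2.getD jj0 0 from hk0v,
                show D2.getD jj0 0 = q.2 from hq2D, hq2]
            simp
        rw [hff, Option.map_some]
        have hv : PySem.List.pyGetD D2 q.1 0 = q.2 := by
          rw [hq1, PySem.List.pyGetD_natCast, hq2D]
        rw [hv]
      have houter : diagOuter D1 D2
          (PySem.List.pyRange 0 ((D1.length : Int) + (D2.length : Int) - 1) 1)
            = some (Tst, q.2) := by
        rw [PySem.List.pyRange_one_append 0 Tst _ hTpos (le_of_lt hTlt),
            diagOuter_skip D1 D2 _ _ hskip, PySem.List.pyRange_one_cons hTlt,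
            show ∀ t ts, diagOuter D1 D2 (t :: ts)
              = (match diagInner D1 D2 t
                  (PySem.List.pyRange (max 0 (t - PySem.List.len D1 + 1))
                    (min t (PySem.List.len D2 - 1) + 1) 1) with
                 | some r => some r
                 | none => diagOuter D1 D2 ts) from fun _ _ => rfl,
            hinner]
      rw [houter]
      simp only [Option.getD_some]
      rw [hq]
      rfl
  · have hms0 : ms.toNat = 0 := by omega
    have hms1 : (ms + 1).toNat = 0 := by omega
    have hd1e : orbitDictA n1 ms = PySem.Dict.empty := by
      rw [orbitDictA, hms0]
      rfl
    have ht1 : trajB n1 ms = [] := by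
      rw [trajB, hms0]
      rfl
    have ht2 : trajB n2 (ms + 1) = [] := by
      rw [trajB, hms1]
      rfl
    rw [hd1e, cfm_empty, ht1, ht2]
    rfl

-- ===== VERDICT (by name: the statement is the Claim_ definition above) =====
theorem confluence_time_min_spec : Claim_equal_confluence_time_min := by
  intro n1 n2 ms _ hpre
  unfold Spec_confluence_time_min
  exact main_eq n1 n2 ms hpre.1 hpre.2
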